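-- pv_equiv track=rewrite | github.com/Robert-Schmid/uf3 | uf3/jax/ppoly.py | naive_coefficient_enumeration
-- ===== SOURCE A (Python) =====
-- import itertools
--
-- def naive_coefficient_enumeration(order):
--     d = len(order)
--
--     polys = ()
--
--     for x, o in enumerate(order):
--         tmp = []
--         for i in range(
--             o, -1, -1
--         ):  # start with higher potencys for readability, i.e. a^3 a^2 ...
--             tmp = tmp + [[x] * i]
--         polys = polys + (tmp,)
--
--     enum = list(itertools.product(*polys))
--     enum = [[list(itertools.chain(*e))] for e in enum]
--
--     return enum
-- ===== SOURCE B (Python) =====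
-- def naive_coefficient_enumeration(order):
--     # Mixed-radix counter: each output row corresponds to one index n in
--     # range(prod(o+1)); decode n into per-dimension digits (last fastest).
--     radices = [o + 1 for o in order]
--     if any(r <= 0 for r in radices):
--         return []
--     total = 1
--     for r in radices:
--         total *= r
--     result = []
--     for n in range(total):
--         rem = n
--         digits = []
--         for r in reversed(radices):
--             digits.append(rem % r)
--             rem //= r
--         digits.reverse()
--         flat = []
--         for x, (d, o) in enumerate(zip(digits, order)):
--             flat.extend([x] * (o - d))
--         result.append([flat])
--     return result
-- ===== Notes on version B (the rewrite author's own statement) =====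
-- stated objective: alternative
-- what changed: Replaces the explicit Cartesian product (itertools.product over per-dimension choice lists, then chain-flattening every tuple) with a mixed-radix counter: the number of rows prod(o+1) is computed up front, and each row is obtained by arithmetically decoding its index n into per-dimension digits via repeated divmod (last dimension fastest), building the flat list directly from the digits.
import Mathlib
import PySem

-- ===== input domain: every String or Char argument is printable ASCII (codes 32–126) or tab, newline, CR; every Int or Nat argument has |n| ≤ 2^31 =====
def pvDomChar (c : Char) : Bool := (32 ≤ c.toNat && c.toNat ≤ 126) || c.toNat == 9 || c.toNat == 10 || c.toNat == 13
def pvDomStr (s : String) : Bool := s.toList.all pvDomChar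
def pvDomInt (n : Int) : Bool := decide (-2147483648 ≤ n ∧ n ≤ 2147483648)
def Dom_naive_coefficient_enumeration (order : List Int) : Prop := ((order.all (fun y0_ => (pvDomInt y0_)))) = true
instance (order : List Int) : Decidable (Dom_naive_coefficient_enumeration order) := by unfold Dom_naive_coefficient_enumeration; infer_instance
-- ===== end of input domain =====

-- B replaces A's product-then-flatten with a mixed-radix counter: one index n per
-- output row, decoded arithmetically into per-dimension digits (alternative algorithm).
-- ===== PORT A =====
-- itertools.product over a list of lists (first factor varies slowest), exact.
def pvProduct (ls : List (List (List Int))) : List (List (List Int)) :=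
  match ls with
  | [] => [[]]
  | l :: ls => l.flatMap (fun a => (pvProduct ls).map (fun e => a :: e))

def naive_coefficient_enumeration (order : List Int) : List (List (List Int)) :=
  -- polys: for x, o in enumerate(order): tmp built by appending [x]*i for i in range(o, -1, -1)
  let polys := order.zipIdx.map (fun p =>
    (PySem.List.pyRange p.1 (-1) (-1)).foldl
      (fun tmp i => tmp ++ [List.replicate i.toNat (Int.ofNat p.2)]) [])
  -- enum = list(itertools.product(*polys)); enum = [[list(itertools.chain(*e))] for e in enum]
  (pvProduct polys).map (fun e => [e.flatten])

-- ===== PORT B =====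
def naive_coefficient_enumeration_alt (order : List Int) : List (List (List Int)) :=
  -- radices = [o + 1 for o in order]; if any(r <= 0 for r in radices): return []
  let radices := order.map (fun o => o + 1)
  if radices.any (fun r => decide (r ≤ 0)) then [] else
  -- total = 1; for r in radices: total *= r
  let total := radices.foldl (fun t r => t * r) 1
  -- for n in range(total): decode n into digits (LSB first, then reversed), build flat row
  (PySem.List.pyRange 0 total 1).map (fun n =>
    let digitsRev := (radices.reverse.foldl
      (fun (acc : List Int × Int) r =>
        (acc.1 ++ [PySem.Int.mod acc.2 r], PySem.Int.floordiv acc.2 r)) ([], n)).1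
    let digits := digitsRev.reverse
    -- for x, (d, o) in enumerate(zip(digits, order)): flat.extend([x] * (o - d))
    let flat := (digits.zip order).zipIdx.flatMap
      (fun p => List.replicate (p.1.2 - p.1.1).toNat (Int.ofNat p.2))
    [flat])

-- ===== PRECONDITION & SPEC =====
def Spec_naive_coefficient_enumeration (order : List Int) (out : List (List (List Int))) : Prop := out = naive_coefficient_enumeration_alt order
instance (order : List Int) (out : List (List (List Int))) : Decidable (Spec_naive_coefficient_enumeration order out) := by unfold Spec_naive_coefficient_enumeration; infer_instance

-- ===== CLAIM =====
def Claim_equal_naive_coefficient_enumeration : Prop := ∀ (order : List Int), Dom_naive_coefficient_enumeration order → Spec_naive_coefficient_enumeration order (naive_coefficient_enumeration order)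

-- ===== LEMMAS AND PROOFS =====

-- product of the radices (o+1) of a suffix of the order list, in Nat
def prodO (os : List Int) : Nat := (os.map (fun o => (o + 1).toNat)).prod

-- mixed-radix digits of n for the radix list of os, least significant (= last dim) FIRST
def DrevO : List Int → Nat → List Nat
  | [], _ => []
  | o :: os, n => DrevO os n ++ [(n / prodO os) % (o + 1).toNat]

-- build the flat row from digits (MSB first) and orders, dimension index starting at s
def flatO (s : Nat) : List Int → List Nat → List Int
  | o :: os, d :: ds => List.replicate (o - Int.ofNat d).toNat (Int.ofNat s) ++ flatO (s + 1) os ds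
  | _, _ => []

-- A-side: the product-of-choices result, recursively, index starting at s
def polyF (s : Nat) : List Int → List (List Int)
  | [] => [[]]
  | o :: os => ((List.range (o + 1).toNat).map (fun (k : Nat) => List.replicate (o - Int.ofNat k).toNat (Int.ofNat s))).flatMap
      (fun a => (polyF (s + 1) os).map (fun e => a ++ e))

theorem foldl_append_singleton {α β : Type} (f : α → β) (r : List α) (acc : List β) :
    r.foldl (fun tmp i => tmp ++ [f i]) acc = acc ++ r.map f := by
  induction r generalizing acc with
  | nil => simp
  | cons a r ih => simp [List.foldl_cons, ih]

theorem pvProduct_of_mem_nil (ls : List (List (List Int))) (h : [] ∈ ls) : pvProduct ls = [] := by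
  induction ls with
  | nil => cases h
  | cons l ls ih =>
      rcases List.mem_cons.mp h with h | h
      · simp [pvProduct, ← h]
      · simp [pvProduct, ih h]

-- itertools.product cons step, with the flatten fused in
theorem map_flatten_product (l : List (List Int)) (ls : List (List (List Int))) :
    (pvProduct (l :: ls)).map (fun e => e.flatten)
      = l.flatMap (fun a => ((pvProduct ls).map (fun e => e.flatten)).map (fun e => a ++ e)) := by
  simp [pvProduct, List.map_flatMap, List.map_map, Function.comp_def]

-- A's (pvProduct polys).map flatten is polyF
theorem A_eq_polyF (os : List Int) (s : Nat) :
    (pvProduct (os.zipIdx s |>.map (fun p =>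
        (PySem.List.pyRange p.1 (-1) (-1)).map (fun i => List.replicate i.toNat (Int.ofNat p.2))))).map
      (fun e => e.flatten) = polyF s os := by
  induction os generalizing s with
  | nil => simp [pvProduct, polyF]
  | cons o os ih =>
      have hc : (PySem.List.pyRange o (-1) (-1)).map
          (fun i => List.replicate i.toNat (Int.ofNat s))
          = (List.range (o + 1).toNat).map
              (fun (k : Nat) => List.replicate (o - Int.ofNat k).toNat (Int.ofNat s)) := by
        rw [PySem.List.pyRange_neg_one o (-1)]
        have h1 : (o - -1).toNat = (o + 1).toNat := by omega
        rw [h1, List.map_map]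
        rfl
      rw [List.zipIdx_cons, List.map_cons, map_flatten_product, ih, polyF, hc,
        List.flatMap_map]

-- range over a product enumerates (quotient, remainder) pairs, quotient slowest
theorem range_mul_flatMap (a T : Nat) :
    List.range (a * T) = (List.range a).flatMap (fun d => (List.range T).map (fun m => d * T + m)) := by
  induction a with
  | zero => simp
  | succ a ih =>
      rw [Nat.succ_mul, List.range_add, ih, List.range_succ, List.flatMap_append]
      simp

-- the digit list depends only on n modulo the radix product
theorem DrevO_mod (os : List Int) (m : Nat) : ∀ (k : Nat), DrevO os (k * prodO os + m) = DrevO os m := by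
  induction os with
  | nil => simp [DrevO]
  | cons o os ih =>
      intro k
      have hP : prodO (o :: os) = (o + 1).toNat * prodO os := by simp [prodO]
      by_cases h0 : prodO os = 0
      · simp [DrevO, hP, h0]
      · have he : k * prodO (o :: os) + m = prodO os * (k * (o + 1).toNat) + m := by
          rw [hP]; ring
        rw [DrevO, he]
        have he2 : prodO os * (k * (o + 1).toNat) + m = (k * (o + 1).toNat) * prodO os + m := by ring
        rw [he2, ih, ← he2, Nat.mul_add_div (Nat.pos_of_ne_zero h0), DrevO,
          Nat.mul_comm k, Nat.mul_add_mod]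

-- MAIN: mapping the decoder over range(prod) equals the Cartesian product
theorem decode_eq_polyF (os : List Int) (s : Nat) :
    (List.range (prodO os)).map (fun n => flatO s os ((DrevO os n).reverse)) = polyF s os := by
  induction os generalizing s with
  | nil => simp [prodO, flatO, polyF]
  | cons o os ih =>
      have hP : prodO (o :: os) = (o + 1).toNat * prodO os := by simp [prodO]
      rw [hP, range_mul_flatMap, List.map_flatMap, polyF, ← ih (s + 1),
        List.flatMap_map]
      apply List.flatMap_congr
      intro d hd
      simp only [List.map_map]
      apply List.map_congr_left
      intro m hm
      have hmT : m < prodO os := List.mem_range.mp hm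
      have hdr : d < (o + 1).toNat := List.mem_range.mp hd
      have hT : 0 < prodO os := Nat.lt_of_le_of_lt (Nat.zero_le m) hmT
      have hstep : DrevO (o :: os) (d * prodO os + m) = DrevO os m ++ [d] := by
        rw [DrevO, DrevO_mod os m d]
        have he : d * prodO os + m = prodO os * d + m := by ring
        rw [he, Nat.mul_add_div hT, Nat.div_eq_of_lt hmT, Nat.add_zero,
          Nat.mod_eq_of_lt hdr]
      show flatO s (o :: os) ((DrevO (o :: os) (d * prodO os + m)).reverse) = _
      rw [hstep, List.reverse_append, List.reverse_singleton, List.singleton_append, flatO]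
      rfl

-- the Int product loop computes the Nat radix product, when all orders are nonnegative
theorem foldl_mul_radices (os : List Int) (hpos : ∀ o ∈ os, 0 ≤ o) :
    ∀ (c : Int), (os.map (fun o => o + 1)).foldl (fun t r => t * r) c = c * (prodO os : Int) := by
  induction os with
  | nil => intro c; simp [prodO]
  | cons o os ih =>
      intro c
      have ho : 0 ≤ o := hpos o (by simp)
      have hP : prodO (o :: os) = (o + 1).toNat * prodO os := by simp [prodO]
      rw [List.map_cons, List.foldl_cons, ih (fun x hx => hpos x (by simp [hx])), hP]
      push_cast [Int.toNat_of_nonneg (by omega : (0:Int) ≤ o + 1)]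
      ring

-- B's divmod loop over the reversed radices computes DrevO (digits LSB-first), cast to Int
theorem loop_eq_DrevO (os : List Int) (hpos : ∀ o ∈ os, 0 ≤ o) (acc : List Int) (k : Nat) :
    ((os.map (fun o => o + 1)).reverse.foldl
        (fun (acc : List Int × Int) r =>
          (acc.1 ++ [PySem.Int.mod acc.2 r], PySem.Int.floordiv acc.2 r)) (acc, (k : Int)))
      = (acc ++ (DrevO os k).map Int.ofNat, ((k / prodO os : Nat) : Int)) := by
  induction os generalizing acc with
  | nil => simp [DrevO, prodO]
  | cons o os ih =>
      have ho : 0 ≤ o := hpos o (by simp)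
      have hcast : o + 1 = (((o + 1).toNat : Nat) : Int) := by omega
      rw [List.map_cons, List.reverse_cons, List.foldl_append,
        ih (fun x hx => hpos x (by simp [hx])) acc, List.foldl_cons, List.foldl_nil,
        hcast, PySem.Int.mod_natCast, PySem.Int.floordiv_natCast, DrevO]
      have hP : prodO (o :: os) = (o + 1).toNat * prodO os := by simp [prodO]
      rw [Nat.div_div_eq_div_mul, Nat.mul_comm (prodO os), ← hP]
      simp

-- B's zip/enumerate flat-row builder is flatO
theorem zip_flat_eq_flatO (os : List Int) (ds : List Nat) (s : Nat) :
    (((ds.map Int.ofNat).zip os).zipIdx s).flatMap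
        (fun p => List.replicate (p.1.2 - p.1.1).toNat (Int.ofNat p.2))
      = flatO s os ds := by
  induction os generalizing ds s with
  | nil => cases ds <;> simp [flatO]
  | cons o os ih =>
      cases ds with
      | nil => simp [flatO]
      | cons d ds =>
          rw [List.map_cons, List.zip_cons_cons, List.zipIdx_cons, List.flatMap_cons, flatO,
            ih ds (s + 1)]

theorem naive_coefficient_enumeration_spec : Claim_equal_naive_coefficient_enumeration := by
  intro order _
  unfold Spec_naive_coefficient_enumeration naive_coefficient_enumeration
    naive_coefficient_enumeration_alt
  dsimp only
  by_cases hneg : (order.map (fun o => o + 1)).any (fun r => decide (r ≤ 0))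
  · -- some o < 0: B returns [], and A's choice list for that o is empty, so the product is empty
    rw [if_pos hneg]
    obtain ⟨r, hr, hrle⟩ := List.any_eq_true.mp hneg
    obtain ⟨o, ho, rfl⟩ := List.mem_map.mp hr
    obtain ⟨kk, hk, hko⟩ := List.getElem_of_mem ho
    have hmem : ([] : List (List Int)) ∈ order.zipIdx.map (fun p =>
        (PySem.List.pyRange p.1 (-1) (-1)).foldl
          (fun tmp i => tmp ++ [List.replicate i.toNat (Int.ofNat p.2)]) []) := by
      refine List.mem_map.mpr ⟨(o, kk), ?_, ?_⟩
      · have : order.zipIdx[kk]'(by simpa using hk) = (o, kk) := by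
          simp [List.getElem_zipIdx, hko]
        exact this ▸ List.getElem_mem _
      · rw [PySem.List.pyRange_neg_one_eq_nil (by simp at hrle; omega : o ≤ -1)]
        simp
    rw [pvProduct_of_mem_nil _ hmem]
    simp
  · rw [if_neg hneg]
    have hpos : ∀ o ∈ order, 0 ≤ o := by
      intro o ho
      by_contra hlt
      exact hneg (List.any_eq_true.mpr ⟨o + 1, List.mem_map.mpr ⟨o, ho, rfl⟩, by simp; omega⟩)
    -- A side: fold each tmp-loop into a map, then apply A_eq_polyF
    have hA : (order.zipIdx.map (fun p =>
        (PySem.List.pyRange p.1 (-1) (-1)).foldl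
          (fun tmp i => tmp ++ [List.replicate i.toNat (Int.ofNat p.2)]) []))
        = order.zipIdx.map (fun p =>
            (PySem.List.pyRange p.1 (-1) (-1)).map
              (fun i => List.replicate i.toNat (Int.ofNat p.2))) := by
      refine List.map_congr_left (fun p _ => ?_)
      rw [foldl_append_singleton]
      simp
    rw [hA]
    have hAe : (pvProduct (order.zipIdx.map (fun p =>
        (PySem.List.pyRange p.1 (-1) (-1)).map
          (fun i => List.replicate i.toNat (Int.ofNat p.2))))).map (fun e => [e.flatten])
        = (polyF 0 order).map (fun c => [c]) := by
      rw [← A_eq_polyF order 0, List.map_map]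
      rfl
    rw [hAe]
    -- B side: total is the radix product, the range is range(prodO), each row decodes via DrevO
    rw [foldl_mul_radices order hpos 1, one_mul, PySem.List.pyRange_one]
    have htn : ((prodO order : Int) - 0).toNat = prodO order := by simp
    rw [htn, ← decode_eq_polyF order 0, List.map_map, List.map_map]
    refine List.map_congr_left (fun k _ => ?_)
    simp only [Function.comp_def, zero_add]
    rw [show ((k : Int)) = ((k : Nat) : Int) from rfl]
    rw [loop_eq_DrevO order hpos [] k, List.nil_append]
    rw [← List.map_reverse, zip_flat_eq_flatO order ((DrevO order k).reverse) 0]
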